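-- pv_equiv track=rewrite | github.com/godot-escoria/escoria-demo-game | tools/docstring_formatter.py | parse_section_lines
-- ===== SOURCE A (Python) =====
-- from typing import Dict, Iterable, List, Optional, Sequence, Tuple
--
-- BR_TOKEN = "[br]"
--
-- def parse_section_lines(raw_lines: Sequence[str]) -> Dict[str, List[str]]:
--     sections: Dict[str, List[str]] = {"description": []}
--     current = "description"
--
--     for line in raw_lines:
--         raw = line.strip()
--         normalized = raw
--         if normalized.endswith(BR_TOKEN):
--             normalized = normalized[: -len(BR_TOKEN)].rstrip()
--         if normalized:
--             normalized_lower = normalized.lower()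
--             matched = False
--             for key, tokens in SECTION_TOKENS.items():
--                 for token in tokens:
--                     token_lower = token.lower()
--                     rest = ""
--                     if normalized_lower == token_lower:
--                         matched = True
--                     elif normalized_lower.startswith(token_lower + " "):
--                         rest = normalized[len(token):].lstrip(" :-")
--                         matched = True
--                     elif normalized_lower.startswith(token_lower + ":"):
--                         rest = normalized[len(token):].lstrip(" :-")
--                         matched = True
--                     elif normalized_lower.startswith(token_lower + "-"):
--                         rest = normalized[len(token):].lstrip(" :-")
--                         matched = True
--                     if matched:
--                         current = key
--                         sections.setdefault(current, [])
--                         if rest: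
--                             sections[current].append(rest)
--                         break
--                 if matched:
--                     break
--             if matched:
--                 continue
--         sections.setdefault(current, []).append(line)
--
--     return sections
--
-- SECTION_TOKENS = {
--     "parameters": ["#### parameters", "**parameters**", "*parameters*", "parameters", "parameters:"],
--     "returns": ["#### returns", "**returns**", "*returns*", "returns:", "return:", "return value", "return value:"],
--     "notes": ["#### notes", "**notes**", "*notes*", "notes", "notes:"],
-- }
-- ===== SOURCE B (Python) =====
-- from typing import Dict, List, Sequence
--
-- BR_TOKEN = "[br]"
--
-- SECTION_TOKENS = {
--     "parameters": ["#### parameters", "**parameters**", "*parameters*", "parameters", "parameters:"],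
--     "returns": ["#### returns", "**returns**", "*returns*", "returns:", "return:", "return value", "return value:"],
--     "notes": ["#### notes", "**notes**", "*notes*", "notes", "notes:"],
-- }
--
-- # Hash index built once: lowercase token -> (priority, section key), priority = the
-- # token's position in the original dict-then-list order; plus the sorted distinct
-- # token lengths.  A line is then classified by probing its own PREFIXES in the dict
-- # (one O(1) lookup per distinct token length) instead of scanning every token, and
-- # the candidate of least priority reproduces the original first-match rule.
-- _TOKEN_MAP: Dict[str, tuple] = {}
-- _prio = 0
-- for _key, _toks in SECTION_TOKENS.items():
--     for _tok in _toks: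
--         _TOKEN_MAP.setdefault(_tok.lower(), (_prio, _key))
--         _prio += 1
-- _LENGTHS = sorted({len(_t) for _t in _TOKEN_MAP})
--
--
-- def _classify(normalized: str):
--     """Return (section key, rest) if the line is a section header, else None."""
--     low = normalized.lower()
--     best = None  # (priority, key, token length)
--     for n in _LENGTHS:
--         if n > len(low):
--             break
--         if n < len(low) and low[n] not in " :-":
--             continue
--         hit = _TOKEN_MAP.get(low[:n])
--         if hit is not None and (best is None or hit[0] < best[0]):
--             best = (hit[0], hit[1], n)
--     if best is None:
--         return None
--     return best[1], normalized[best[2]:].lstrip(" :-")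
--
--
-- def parse_section_lines(raw_lines: Sequence[str]) -> Dict[str, List[str]]:
--     sections: Dict[str, List[str]] = {"description": []}
--     current = "description"
--     for line in raw_lines:
--         normalized = line.strip()
--         if normalized.endswith(BR_TOKEN):
--             normalized = normalized[: -len(BR_TOKEN)].rstrip()
--         hit = _classify(normalized)
--         if hit is None:
--             sections.setdefault(current, []).append(line)
--         else:
--             current, rest = hit
--             bucket = sections.setdefault(current, [])
--             if rest:
--                 bucket.append(rest)
--     return sections
-- ===== Notes on version B (the rewrite author's own statement) =====
-- stated objective: faster
-- what changed: Inverts the matching: instead of A's nested scan of every section alias against each line, B builds once a hash map from lowercase token to (priority, section key) plus the sorted distinct token lengths, classifies each line with one dictionary probe per distinct prefix length (boundary check, early break once lengths exceed the line) and keeps the candidate of least priority, which provably reproduces A's first-match rule.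
import Mathlib
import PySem

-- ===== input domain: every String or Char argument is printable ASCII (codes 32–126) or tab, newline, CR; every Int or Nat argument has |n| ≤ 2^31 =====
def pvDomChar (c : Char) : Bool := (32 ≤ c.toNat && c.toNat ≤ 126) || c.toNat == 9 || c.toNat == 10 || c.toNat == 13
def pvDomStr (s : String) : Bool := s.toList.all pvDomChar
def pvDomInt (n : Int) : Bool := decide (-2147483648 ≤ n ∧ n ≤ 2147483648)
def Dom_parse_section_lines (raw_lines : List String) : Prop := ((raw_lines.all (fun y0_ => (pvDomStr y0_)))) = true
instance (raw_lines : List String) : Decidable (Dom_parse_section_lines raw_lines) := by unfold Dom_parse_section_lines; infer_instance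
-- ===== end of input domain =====

-- B replaces A's nested token scan per line by a hash index built once (lowercase token ->
-- (priority, key) plus sorted distinct token lengths) probed with the line's own prefixes,
-- keeping the candidate of least priority; objective: faster (measured: fewer, hashed probes per line). Return value only (A mutates nothing).


-- ===== PORT A =====
def pvBR : List Char := ['[', 'b', 'r', ']']

def pvSectionTokens : List (String × List String) :=
  [("parameters", ["#### parameters", "**parameters**", "*parameters*", "parameters", "parameters:"]),
   ("returns", ["#### returns", "**returns**", "*returns*", "returns:", "return:", "return value", "return value:"]),
   ("notes", ["#### notes", "**notes**", "*notes*", "notes", "notes:"])]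

-- s.lstrip(" :-") ported by hand (no PySem left-strip with a chars argument): exact —
-- Python removes the longest leading run of characters from {' ', ':', '-'}.
def pvLstripPunct (cs : List Char) : List Char :=
  cs.dropWhile (fun c => c == ' ' || c == ':' || c == '-')

-- A's inner `for token in tokens` loop (elif chain, break on match)
def pvTokLoopA (normalized low : List Char) (key : String) : List String → Option (String × List Char)
  | [] => none
  | tok :: toks =>
    let tokLower := PySem.Chars.lower tok.toList
    if low == tokLower then some (key, [])
    else if PySem.Chars.startswith low (tokLower ++ [' ']) then
      some (key, pvLstripPunct (normalized.drop tok.toList.length))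
    else if PySem.Chars.startswith low (tokLower ++ [':']) then
      some (key, pvLstripPunct (normalized.drop tok.toList.length))
    else if PySem.Chars.startswith low (tokLower ++ ['-']) then
      some (key, pvLstripPunct (normalized.drop tok.toList.length))
    else pvTokLoopA normalized low key toks

-- A's outer `for key, tokens in SECTION_TOKENS.items()` loop (break on match)
def pvKeyLoopA (normalized low : List Char) : List (String × List String) → Option (String × List Char)
  | [] => none
  | (key, toks) :: rest =>
    match pvTokLoopA normalized low key toks with
    | some r => some r
    | none => pvKeyLoopA normalized low rest

-- one iteration of A's `for line in raw_lines` loop; `setdefault(k, []).append(x)` and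
-- `sections[k].append(x)` (k present) are both Dict.modify k [] (· ++ [x])
def pvStepA (st : PySem.Dict String (List String) × String) (line : String) :
    PySem.Dict String (List String) × String :=
  let sections := st.1
  let current := st.2
  let raw := PySem.Chars.strip line.toList
  let normalized :=
    if PySem.Chars.endswith raw pvBR then
      PySem.Chars.rstrip (PySem.Chars.slice raw none (some (-4)))
    else raw
  if normalized.isEmpty then
    (sections.modify current [] (· ++ [line]), current)
  else
    match pvKeyLoopA normalized (PySem.Chars.lower normalized) pvSectionTokens with
    | some kr =>
      let sections := sections.setdefault kr.1 []
      let sections :=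
        if kr.2.isEmpty then sections else sections.modify kr.1 [] (· ++ [String.ofList kr.2])
      (sections, kr.1)
    | none => (sections.modify current [] (· ++ [line]), current)

def parse_section_lines (raw_lines : List String) : List (String × List String) :=
  (raw_lines.foldl pvStepA (PySem.Dict.ofList [("description", [])], "description")).1.items

-- ===== PORT B =====
-- the _TOKEN_MAP builder loop: lowercase token -> (priority, section key), setdefault, enumerating
def pvTokenMapB : PySem.Dict (List Char) (Nat × String) :=
  (pvSectionTokens.foldl
    (fun st kt =>
      kt.2.foldl
        (fun st t => (st.1.setdefault (PySem.Chars.lower t.toList) (st.2, kt.1), st.2 + 1))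
        st)
    (PySem.Dict.empty, 0)).1

-- _LENGTHS = sorted({len(t) for t in _TOKEN_MAP})
def pvLengthsB : List Nat :=
  PySem.List.sorted (PySem.Set.ofList (pvTokenMapB.keys.map List.length)) (fun x => x) false

-- the `for n in _LENGTHS` loop of _classify, with its break/continue; best = (priority, key, n).
-- low[:n] with n : Nat is List.take n (exact: a nonnegative Python slice bound clamps like take);
-- low[n] is guarded by n < len(low), so List.getD is exact.
def pvLenLoopB (low : List Char) : List Nat → Option (Nat × String × Nat) → Option (Nat × String × Nat)
  | [], best => best
  | n :: ns, best =>
    if low.length < n then best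
    else if decide (n < low.length) &&
        !(low.getD n ' ' == ' ' || low.getD n ' ' == ':' || low.getD n ' ' == '-') then
      pvLenLoopB low ns best
    else
      match pvTokenMapB.get? (low.take n) with
      | none => pvLenLoopB low ns best
      | some h =>
        pvLenLoopB low ns
          (match best with
           | none => some (h.1, h.2, n)
           | some b => if h.1 < b.1 then some (h.1, h.2, n) else some b)

-- _classify(normalized)
def pvClassifyB (normalized : List Char) : Option (String × List Char) :=
  match pvLenLoopB (PySem.Chars.lower normalized) pvLengthsB none with
  | none => none
  | some b => some (b.2.1, pvLstripPunct (normalized.drop b.2.2))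

-- one iteration of B's `for line in raw_lines` loop
def pvStepB (st : PySem.Dict String (List String) × String) (line : String) :
    PySem.Dict String (List String) × String :=
  let sections := st.1
  let current := st.2
  let n0 := PySem.Chars.strip line.toList
  let normalized :=
    if PySem.Chars.endswith n0 pvBR then
      PySem.Chars.rstrip (PySem.Chars.slice n0 none (some (-4)))
    else n0
  match pvClassifyB normalized with
  | none => (sections.modify current [] (· ++ [line]), current)
  | some kr =>
    let sections := sections.setdefault kr.1 []
    let sections :=
      if kr.2.isEmpty then sections else sections.modify kr.1 [] (· ++ [String.ofList kr.2])
    (sections, kr.1)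

def parse_section_lines_alt (raw_lines : List String) : List (String × List String) :=
  (raw_lines.foldl pvStepB (PySem.Dict.ofList [("description", [])], "description")).1.items

-- ===== PRECONDITION & SPEC =====
def Spec_parse_section_lines (raw_lines : List String) (out : List (String × List String)) : Prop := out = parse_section_lines_alt raw_lines
instance (raw_lines : List String) (out : List (String × List String)) : Decidable (Spec_parse_section_lines raw_lines out) := by unfold Spec_parse_section_lines; infer_instance

-- ===== CLAIM (what is proved, stated in full; the proofs are below) =====
def Claim_equal_parse_section_lines : Prop := ∀ (raw_lines : List String), Dom_parse_section_lines raw_lines → Spec_parse_section_lines raw_lines (parse_section_lines raw_lines)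

-- ===== LEMMAS AND PROOFS =====

-- A's match predicate (used only in the proofs): does lowercase token `tok` head line `low`?
def pvMatches (low : List Char) (tok : List Char) : Bool :=
  low == tok || PySem.Chars.startswith low (tok ++ [' ']) ||
    PySem.Chars.startswith low (tok ++ [':']) || PySem.Chars.startswith low (tok ++ ['-'])

-- flat (key, lowercase token) list in A's scan order
def pvFlatTokens : List (String × List Char) :=
  pvSectionTokens.flatMap (fun kt => kt.2.map (fun t => (kt.1, PySem.Chars.lower t.toList)))

-- the same list enumerated with priorities (proof-side view of B's _TOKEN_MAP)
def pvE : List (Nat × String × List Char) :=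
  (List.range pvFlatTokens.length).map (fun i => (i, pvFlatTokens.getD i ("", [])))

-- boundary guard of B's length loop at n, then the dict probe
def pvHit (low : List Char) (n : Nat) : Option (Nat × String × Nat) :=
  if n ≤ low.length ∧ (n = low.length ∨ low.getD n ' ' = ' ' ∨ low.getD n ' ' = ':' ∨ low.getD n ' ' = '-') then
    match pvTokenMapB.get? (low.take n) with
    | none => none
    | some h => some (h.1, h.2, n)
  else none

def pvUpd (b : Option (Nat × String × Nat)) (h : Nat × String × Nat) : Option (Nat × String × Nat) :=
  match b with
  | none => some h
  | some bb => if h.1 < bb.1 then some h else some bb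

theorem pv_lower_length (cs : List Char) : (PySem.Chars.lower cs).length = cs.length := by
  simp [PySem.Chars.lower]

theorem pv_tokLoop_eq (normalized low : List Char) (hlen : low.length = normalized.length)
    (key : String) (toks : List String) :
    pvTokLoopA normalized low key toks =
      ((toks.map (fun t => (key, PySem.Chars.lower t.toList))).find?
          (fun kt => pvMatches low kt.2)).map
        (fun kt => (kt.1, pvLstripPunct (normalized.drop kt.2.length))) := by
  induction toks with
  | nil => simp [pvTokLoopA]
  | cons tok toks ih =>
    simp only [pvTokLoopA, List.map_cons, List.find?_cons]
    by_cases h1 : low == PySem.Chars.lower tok.toList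
    · have hl : (PySem.Chars.lower tok.toList).length = normalized.length := by
        rw [← hlen]; exact (congrArg List.length (eq_of_beq h1)).symm
      have hd : normalized.drop (PySem.Chars.lower tok.toList).length = [] :=
        List.drop_eq_nil_of_le (le_of_eq hl.symm)
      have hf : pvMatches low (PySem.Chars.lower tok.toList) = true := by
        simp [pvMatches, h1]
      simp [h1, hf, hd, pvLstripPunct]
    · by_cases h2 : PySem.Chars.startswith low (PySem.Chars.lower tok.toList ++ [' '])
      · have hf : pvMatches low (PySem.Chars.lower tok.toList) = true := by
          simp [pvMatches, h2]
        simp [h1, h2, hf, pv_lower_length]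
      · by_cases h3 : PySem.Chars.startswith low (PySem.Chars.lower tok.toList ++ [':'])
        · have hf : pvMatches low (PySem.Chars.lower tok.toList) = true := by
            simp [pvMatches, h3]
          simp [h1, h2, h3, hf, pv_lower_length]
        · by_cases h4 : PySem.Chars.startswith low (PySem.Chars.lower tok.toList ++ ['-'])
          · have hf : pvMatches low (PySem.Chars.lower tok.toList) = true := by
              simp [pvMatches, h4]
            simp [h1, h2, h3, h4, hf, pv_lower_length]
          · have hf : pvMatches low (PySem.Chars.lower tok.toList) = false := by
              simp [pvMatches, h1, h2, h3, h4]
            simp [h1, h2, h3, h4, hf, ih]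

theorem pv_keyLoop_eq (normalized low : List Char) (hlen : low.length = normalized.length)
    (table : List (String × List String)) :
    pvKeyLoopA normalized low table =
      ((table.flatMap (fun kt => kt.2.map (fun t => (kt.1, PySem.Chars.lower t.toList)))).find?
          (fun kt => pvMatches low kt.2)).map
        (fun kt => (kt.1, pvLstripPunct (normalized.drop kt.2.length))) := by
  induction table with
  | nil => simp [pvKeyLoopA]
  | cons kt rest ih =>
    obtain ⟨key, toks⟩ := kt
    simp only [pvKeyLoopA, List.flatMap_cons, List.find?_append]
    rw [pv_tokLoop_eq normalized low hlen key toks]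
    cases h : (toks.map (fun t => (key, PySem.Chars.lower t.toList))).find?
        (fun kt => pvMatches low kt.2) with
    | none => simp [ih]
    | some r => simp

-- concrete facts about B's precomputed index (all by kernel evaluation)
theorem pv_E_proj : pvE.map (·.2) = pvFlatTokens := by decide
theorem pv_map_get (d : Nat × String × List Char) (hd : d ∈ pvE) :
    pvTokenMapB.get? d.2.2 = some (d.1, d.2.1) := by revert d; decide
theorem pv_len_mem (d : Nat × String × List Char) (hd : d ∈ pvE) :
    d.2.2.length ∈ pvLengthsB := by revert d; decide
theorem pv_items_E (p : List Char × Nat × String) (hp : p ∈ pvTokenMapB.items) :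
    ∃ d ∈ pvE, d.2.2 = p.1 ∧ (d.1, d.2.1) = p.2 := by revert p; decide
theorem pv_E_prio_inj : ∀ d ∈ pvE, ∀ d' ∈ pvE, d.1 = d'.1 → d = d' := by decide
theorem pv_E_pairwise : pvE.Pairwise (fun a b => a.1 < b.1) := by decide
theorem pv_lengths_sorted : pvLengthsB.Pairwise (· ≤ ·) := by decide

-- `t ++ [c]` is a prefix of `low` iff the first |t| chars are t and the next one is c
theorem pv_prefix_snoc_iff (low t : List Char) (c : Char) :
    (t ++ [c]) <+: low ↔
      low.take t.length = t ∧ t.length < low.length ∧ low.getD t.length ' ' = c := by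
  constructor
  · intro h
    have hlen : t.length + 1 ≤ low.length := by simpa using h.length_le
    have hlt : t.length < low.length := by omega
    have htake : t ++ [c] = low.take (t.length + 1) := by
      have := List.prefix_iff_eq_take.mp h
      simpa using this
    have hsucc : low.take (t.length + 1) = low.take t.length ++ [low[t.length]] := by
      rw [List.take_add_one]
      simp [List.getElem?_eq_getElem hlt]
    rw [hsucc] at htake
    have hlen2 : t.length = (low.take t.length).length := by
      simp [List.length_take, Nat.min_eq_left (le_of_lt hlt)]
    obtain ⟨h1, h2⟩ := List.append_inj htake hlen2
    refine ⟨h1.symm, hlt, ?_⟩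
    rw [List.getD_eq_getElem low ' ' hlt]
    exact (List.singleton_inj.mp h2).symm
  · rintro ⟨ht, hlt, hc⟩
    have htake : t ++ [c] = low.take (t.length + 1) := by
      rw [List.take_add_one]
      simp [List.getElem?_eq_getElem hlt, ht]
      rw [← hc, List.getD_eq_getElem low ' ' hlt]
    rw [List.prefix_iff_eq_take]
    simpa using htake

-- A's four-way match test, characterised by prefix + boundary
theorem pv_match_iff (low t : List Char) :
    pvMatches low t = true ↔
      low.take t.length = t ∧ t.length ≤ low.length ∧
        (t.length = low.length ∨ low.getD t.length ' ' = ' ' ∨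
          low.getD t.length ' ' = ':' ∨ low.getD t.length ' ' = '-') := by
  unfold pvMatches
  simp only [Bool.or_eq_true, beq_iff_eq, PySem.Chars.startswith_iff, pv_prefix_snoc_iff]
  constructor
  · rintro (((h | h) | h) | h)
    · subst h; simp
    · exact ⟨h.1, le_of_lt h.2.1, Or.inr (Or.inl h.2.2)⟩
    · exact ⟨h.1, le_of_lt h.2.1, Or.inr (Or.inr (Or.inl h.2.2))⟩
    · exact ⟨h.1, le_of_lt h.2.1, Or.inr (Or.inr (Or.inr h.2.2))⟩
  · rintro ⟨ht, hle, hrest⟩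
    by_cases he : t.length = low.length
    · left; left; left
      rw [← ht, he, List.take_length]
    · have hlt : t.length < low.length := lt_of_le_of_ne hle he
      rcases hrest with h | h | h | h
      · exact absurd h he
      · exact Or.inl (Or.inl (Or.inr ⟨ht, hlt, h⟩))
      · exact Or.inl (Or.inr ⟨ht, hlt, h⟩)
      · exact Or.inr ⟨ht, hlt, h⟩

-- B's length loop = fold of pvUpd over the hit list (needs the lengths ascending for the break)
theorem pv_lenLoop_eq_fold (low : List Char) (ns : List Nat) (best : Option (Nat × String × Nat))
    (hs : ns.Pairwise (· ≤ ·)) :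
    pvLenLoopB low ns best = (ns.filterMap (pvHit low)).foldl pvUpd best := by
  induction ns generalizing best with
  | nil => simp [pvLenLoopB]
  | cons n ns ih =>
    have hhead : ∀ m ∈ ns, n ≤ m := fun m hm => (List.pairwise_cons.mp hs).1 m hm
    have htail : ns.Pairwise (· ≤ ·) := (List.pairwise_cons.mp hs).2
    by_cases hbig : low.length < n
    · have hskip : ∀ m ∈ n :: ns, pvHit low m = none := by
        intro m hm
        have hnm : n ≤ m := by
          rcases hm with _ | hm
          · exact le_refl _
          · exact hhead m (by assumption)
        unfold pvHit
        rw [if_neg]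
        intro hcon
        omega
      have : (n :: ns).filterMap (pvHit low) = [] := by
        rw [List.filterMap_eq_nil_iff]
        exact hskip
      rw [this]
      simp [pvLenLoopB, hbig]
    · by_cases hcont : n < low.length ∧ ¬(low.getD n ' ' = ' ' ∨ low.getD n ' ' = ':' ∨ low.getD n ' ' = '-')
      · obtain ⟨hlt, hnot⟩ := hcont
        have hA : ¬ low.getD n ' ' = ' ' := fun h => hnot (Or.inl h)
        have hB : ¬ low.getD n ' ' = ':' := fun h => hnot (Or.inr (Or.inl h))
        have hC : ¬ low.getD n ' ' = '-' := fun h => hnot (Or.inr (Or.inr h))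
        have hhit : pvHit low n = none := by
          unfold pvHit
          rw [if_neg]
          rintro ⟨h1, (h2 | h2)⟩
          · omega
          · exact hnot h2
        have hcond : (decide (n < low.length) &&
            !(low.getD n ' ' == ' ' || low.getD n ' ' == ':' || low.getD n ' ' == '-')) = true := by
          simp only [Bool.and_eq_true, decide_eq_true_eq, Bool.not_eq_true',
            Bool.or_eq_false_iff, beq_eq_false_iff_ne, ne_eq]
          exact ⟨hlt, ⟨hA, hB⟩, hC⟩
        simp only [pvLenLoopB, if_neg hbig, hcond, List.filterMap_cons, hhit]
        rw [if_pos trivial]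
        exact ih best htail
      · have hguard : n ≤ low.length ∧ (n = low.length ∨ low.getD n ' ' = ' ' ∨
            low.getD n ' ' = ':' ∨ low.getD n ' ' = '-') := by
          constructor
          · omega
          · by_cases he : n = low.length
            · exact Or.inl he
            · right
              have hlt : n < low.length := by omega
              by_contra hcon
              exact hcont ⟨hlt, fun h => hcon h⟩
        have hcond : (decide (n < low.length) &&
            !(low.getD n ' ' == ' ' || low.getD n ' ' == ':' || low.getD n ' ' == '-')) = false := by
          rcases hguard.2 with h | h | h | h
          · simp [h]
          all_goals (simp only [List.getD] at h; simp [h])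
        cases hget : pvTokenMapB.get? (low.take n) with
        | none =>
          have hhit : pvHit low n = none := by unfold pvHit; rw [if_pos hguard, hget]
          simp only [pvLenLoopB, if_neg hbig, hcond, List.filterMap_cons, hhit, hget]
          rw [if_neg (by simp)]
          exact ih best htail
        | some h =>
          have hhit : pvHit low n = some (h.1, h.2, n) := by
            unfold pvHit; rw [if_pos hguard, hget]
          simp only [pvLenLoopB, if_neg hbig, hcond, List.filterMap_cons, hhit, hget]
          rw [if_neg (by simp)]
          rw [List.foldl_cons]
          have hupd : (match best with
              | none => some (h.1, h.2, n)
              | some b => if h.1 < b.1 then some (h.1, h.2, n) else some b) =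
              pvUpd best (h.1, h.2, n) := by
            cases best <;> rfl
          rw [hupd]
          exact ih _ htail

-- the fold of pvUpd never loses a some accumulator
theorem pv_foldl_upd_isSome (l : List (Nat × String × Nat)) (b : Nat × String × Nat) :
    (l.foldl pvUpd (some b)).isSome := by
  induction l generalizing b with
  | nil => simp
  | cons x l ih =>
    simp only [List.foldl_cons, pvUpd]
    split <;> exact ih _

theorem pv_foldl_upd_none_eq_nil (l : List (Nat × String × Nat)) :
    l.foldl pvUpd none = none ↔ l = [] := by
  cases l with
  | nil => simp
  | cons x l =>
    simp only [List.foldl_cons, pvUpd]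
    constructor
    · intro h
      have := pv_foldl_upd_isSome l x
      rw [h] at this
      simp at this
    · intro h; simp at h

-- the fold of pvUpd computes an element of minimal priority
theorem pv_foldl_upd_min (l : List (Nat × String × Nat)) (b : Option (Nat × String × Nat))
    (r : Nat × String × Nat) (h : l.foldl pvUpd b = some r) :
    (b = some r ∨ r ∈ l) ∧ (∀ bb, b = some bb → r.1 ≤ bb.1) ∧ ∀ x ∈ l, r.1 ≤ x.1 := by
  induction l generalizing b with
  | nil =>
    simp only [List.foldl_nil] at h
    subst h
    exact ⟨Or.inl rfl, fun bb hbb => by injection hbb with hbb; rw [hbb], by simp⟩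
  | cons x l ih =>
    simp only [List.foldl_cons] at h
    cases b with
    | none =>
      obtain ⟨hmem, hb, hall⟩ := ih (some x) (by simpa [pvUpd] using h)
      have hrx : r.1 ≤ x.1 := by
        rcases hmem with hm | hm
        · injection hm with hm; rw [hm]
        · exact hb x rfl
      refine ⟨?_, fun c hc => by simp at hc, ?_⟩
      · rcases hmem with hm | hm
        · exact Or.inr (by injection hm with hm; rw [← hm]; exact List.mem_cons_self)
        · exact Or.inr (List.mem_cons_of_mem _ hm)
      · intro y hy
        rcases List.mem_cons.mp hy with hy | hy
        · subst hy; exact hrx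
        · exact hall y hy
    | some bb =>
      by_cases hlt : x.1 < bb.1
      · obtain ⟨hmem, hb, hall⟩ := ih (some x) (by simpa [pvUpd, hlt] using h)
        have hrx : r.1 ≤ x.1 := by
          rcases hmem with hm | hm
          · injection hm with hm; rw [hm]
          · exact hb x rfl
        refine ⟨Or.inr ?_, ?_, ?_⟩
        · rcases hmem with hm | hm
          · injection hm with hm; rw [← hm]; exact List.mem_cons_self
          · exact List.mem_cons_of_mem _ hm
        · intro c hc
          injection hc with hc; subst hc
          exact le_of_lt (lt_of_le_of_lt hrx hlt)
        · intro y hy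
          rcases List.mem_cons.mp hy with hy | hy
          · subst hy; exact hrx
          · exact hall y hy
      · obtain ⟨hmem, hb, hall⟩ := ih (some bb) (by simpa [pvUpd, hlt] using h)
        have hrb : r.1 ≤ bb.1 := by
          rcases hmem with hm | hm
          · injection hm with hm; rw [hm]
          · exact hb bb rfl
        refine ⟨?_, ?_, ?_⟩
        · rcases hmem with hm | hm
          · exact Or.inl hm
          · exact Or.inr (List.mem_cons_of_mem _ hm)
        · intro c hc
          injection hc with hc; subst hc
          exact hrb
        · intro y hy
          rcases List.mem_cons.mp hy with hy | hy
          · subst hy; omega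
          · exact hall y hy

-- find? in a priority-increasing list returns the matching element of least priority
theorem pv_find_min (P : Nat × String × List Char → Bool) (l : List (Nat × String × List Char))
    (hp : l.Pairwise (fun a b => a.1 < b.1)) (d : Nat × String × List Char)
    (h : l.find? P = some d) : ∀ d' ∈ l, P d' = true → d.1 ≤ d'.1 := by
  induction l with
  | nil => simp at h
  | cons x l ih =>
    by_cases hx : P x = true
    · rw [List.find?_cons_of_pos hx] at h
      injection h with h
      subst h
      intro d' hd' _
      rcases List.mem_cons.mp hd' with he | he
      · rw [he]
      · exact le_of_lt ((List.pairwise_cons.mp hp).1 d' he)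
    · rw [List.find?_cons_of_neg (by simpa using hx)] at h
      intro d' hd' hPd'
      rcases List.mem_cons.mp hd' with he | he
      · rw [he] at hPd'; exact absurd hPd' hx
      · exact ih (List.pairwise_cons.mp hp).2 h d' he hPd'

-- the hits of B's length scan are exactly the matching enumerated tokens
theorem pv_mem_hits_iff (low : List Char) (e : Nat × String × Nat) :
    e ∈ pvLengthsB.filterMap (pvHit low) ↔
      ∃ d ∈ pvE, pvMatches low d.2.2 = true ∧ e = (d.1, d.2.1, d.2.2.length) := by
  rw [List.mem_filterMap]
  constructor
  · rintro ⟨n, hn, hhit⟩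
    unfold pvHit at hhit
    split at hhit
    case isFalse => simp at hhit
    case isTrue hguard =>
      cases hget : pvTokenMapB.get? (low.take n) with
      | none => rw [hget] at hhit; simp at hhit
      | some h =>
        rw [hget] at hhit
        cases hhit
        have hmemitems : (low.take n, h) ∈ pvTokenMapB.items :=
          PySem.Dict.mem_items_of_get?_eq_some _ hget
        obtain ⟨d, hd, hdt, hdv⟩ := pv_items_E _ hmemitems
        have hlen : (low.take n).length = n := by
          simp [List.length_take, Nat.min_eq_left hguard.1]
        have hdlen : d.2.2.length = n := by rw [hdt]; exact hlen
        refine ⟨d, hd, ?_, ?_⟩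
        · rw [pv_match_iff]
          rw [hdlen, hdt]
          exact ⟨rfl, hguard.1, hguard.2⟩
        · have : (d.1, d.2.1) = h := hdv
          rw [hdlen, ← this]
  · rintro ⟨d, hd, hm, he⟩
    refine ⟨d.2.2.length, pv_len_mem d hd, ?_⟩
    rw [pv_match_iff] at hm
    unfold pvHit
    rw [if_pos ⟨hm.2.1, hm.2.2⟩, hm.1, pv_map_get d hd, he]

-- MAIN: B's classifier = A's first-match, for every line
theorem pv_classify_eq (normalized : List Char) :
    pvClassifyB normalized = pvKeyLoopA normalized (PySem.Chars.lower normalized) pvSectionTokens := by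
  set low := PySem.Chars.lower normalized with hlow
  rw [pv_keyLoop_eq normalized low (by rw [hlow]; exact pv_lower_length normalized) pvSectionTokens]
  show pvClassifyB normalized = _
  unfold pvClassifyB
  rw [← hlow]
  rw [pv_lenLoop_eq_fold low pvLengthsB none pv_lengths_sorted]
  rw [show pvSectionTokens.flatMap
        (fun kt => kt.2.map (fun t => (kt.1, PySem.Chars.lower t.toList))) = pvFlatTokens from rfl]
  rw [← pv_E_proj, List.find?_map]
  cases hfind : pvE.find? ((fun kt => pvMatches low kt.2) ∘ (·.2)) with
  | none =>
    have hnomatch : ∀ d ∈ pvE, ¬ (pvMatches low d.2.2 = true) := by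
      intro d hd hm
      have := List.find?_eq_none.mp hfind d hd
      exact this (by simpa using hm)
    have hhits : pvLengthsB.filterMap (pvHit low) = [] := by
      rw [List.eq_nil_iff_forall_not_mem]
      intro e he
      obtain ⟨d, hd, hm, _⟩ := (pv_mem_hits_iff low e).mp he
      exact hnomatch d hd hm
    rw [hhits]
    rfl
  | some d =>
    have hPd : pvMatches low d.2.2 = true := by
      have := List.find?_some hfind
      simpa using this
    have hdmem : d ∈ pvE := List.mem_of_find?_eq_some hfind
    have hdhit : (d.1, d.2.1, d.2.2.length) ∈ pvLengthsB.filterMap (pvHit low) :=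
      (pv_mem_hits_iff low _).mpr ⟨d, hdmem, hPd, rfl⟩
    have hne : pvLengthsB.filterMap (pvHit low) ≠ [] := by
      intro h; rw [h] at hdhit; simp at hdhit
    cases hr : (pvLengthsB.filterMap (pvHit low)).foldl pvUpd none with
    | none => exact absurd ((pv_foldl_upd_none_eq_nil _).mp hr) hne
    | some r =>
      obtain ⟨hrm, _, hrmin⟩ := pv_foldl_upd_min _ none r hr
      rcases hrm with hrm | hrm
      · simp at hrm
      obtain ⟨d', hd', hm', he'⟩ := (pv_mem_hits_iff low r).mp hrm
      have h1 : r.1 ≤ d.1 := hrmin _ hdhit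
      have h2 : d.1 ≤ d'.1 := pv_find_min _ pvE pv_E_pairwise d hfind d' hd' (by simpa using hm')
      have hr1 : r.1 = d'.1 := by rw [he']
      have heq : d' = d := pv_E_prio_inj d' hd' d hdmem (by omega)
      subst heq
      rw [he']
      rfl

theorem pv_step_eq : pvStepA = pvStepB := by
  funext st line
  simp only [pvStepA, pvStepB]
  generalize (if PySem.Chars.endswith (PySem.Chars.strip line.toList) pvBR then
      PySem.Chars.rstrip (PySem.Chars.slice (PySem.Chars.strip line.toList) none (some (-4)))
    else PySem.Chars.strip line.toList) = N
  rw [pv_classify_eq N]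
  cases hN : N.isEmpty with
  | true =>
    have hnil : N = [] := by simpa using hN
    subst hnil
    have hk : pvKeyLoopA [] (PySem.Chars.lower []) pvSectionTokens = none := by decide
    simp [hk]
  | false =>
    simp only [Bool.false_eq_true, if_false]
    cases pvKeyLoopA N (PySem.Chars.lower N) pvSectionTokens with
    | none => rfl
    | some kt => rfl

-- ===== VERDICT (by name: the statement is the Claim_ definition above) =====
theorem parse_section_lines_spec : Claim_equal_parse_section_lines := by
  intro raw_lines _
  unfold Spec_parse_section_lines parse_section_lines parse_section_lines_alt
  rw [pv_step_eq]
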